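-- pv_equiv track=rewrite | github.com/gwyli/swopy | swopy/systems/_algorithms.py | multiplicative_myriad_from_numeral
-- ===== SOURCE A (Python) =====
-- from collections.abc import Iterable, Mapping
--
-- def multiplicative_myriad_from_numeral(
--     numeral: str,
--     digit_map: Mapping[str, int],
--     multiplier_map: Mapping[str, int],
--     system_name: str,
-- ) -> int:
--     """Convert a multiplicative-myriad numeral string to an integer.
--
--     Splits at the myriad glyph (if present). The portion before is parsed as
--     a sub-myriad coefficient (multiplied by 10,000); the portion after is
--     parsed as the remainder. If no myriad glyph is present, the whole string
--     is parsed as a sub-myriad number.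
--
--     Within each sub-myriad segment, a digit glyph followed by a sub-myriad
--     multiplier glyph contributes ``digit × multiplier``; a lone multiplier
--     glyph contributes ``1 × multiplier``; a lone digit glyph contributes its
--     value.
--
--     Args:
--         numeral: The numeral string to convert.
--         digit_map: Mapping from digit glyphs to their values (1–9).
--         multiplier_map: Mapping from multiplier glyphs to their values
--             (10000, 1000, 100, 10).
--         system_name: Human-readable system name used in the error message.
--
--     Returns:
--         The integer value of ``numeral``.
--
--     Raises:
--         ValueError: If an unrecognised character is encountered.
--     """
--     items = list(multiplier_map.items())
--     myriad_glyph = items[0][0]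
--     sub_mult_map = dict(items[1:])
--
--     def parse_sub(s: str) -> int:
--         total = 0
--         i = 0
--         while i < len(s):
--             c = s[i]
--             if c in digit_map:
--                 digit = digit_map[c]
--                 i += 1
--                 if i < len(s) and s[i] in sub_mult_map:
--                     total += digit * sub_mult_map[s[i]]
--                     i += 1
--                 else:
--                     total += digit
--             elif c in sub_mult_map:
--                 total += sub_mult_map[c]
--                 i += 1
--             else:
--                 raise ValueError(f"Invalid {system_name} character: {c!r}")
--         return total
--
--     if myriad_glyph in numeral:
--         idx = numeral.index(myriad_glyph)
--         coeff = parse_sub(numeral[:idx]) if idx > 0 else 1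
--         remainder = parse_sub(numeral[idx + 1 :]) if idx + 1 < len(numeral) else 0
--         return coeff * 10000 + remainder
--     return parse_sub(numeral)
-- ===== SOURCE B (Python) =====
-- def multiplicative_myriad_from_numeral(
--     numeral: str,
--     digit_map,
--     multiplier_map,
--     system_name: str,
-- ) -> int:
--     """Single forward pass over the numeral: no split, no slicing, no helper.
--
--     State: `result` (myriad part), `section` (current sub-myriad total),
--     `pending` (a digit value awaiting a possible multiplier), `seen_myriad`,
--     and `first` (whether any character precedes the current one).
--     """
--     items = list(multiplier_map.items())
--     myriad = items[0][0]
--     sub = dict(items[1:])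
--
--     result = 0
--     section = 0
--     pending = None
--     seen_myriad = False
--     first = True
--     for c in numeral:
--         if not seen_myriad and c == myriad:
--             flushed = section + (pending if pending is not None else 0)
--             result = (1 if first else flushed) * 10000
--             section = 0
--             pending = None
--             seen_myriad = True
--         elif pending is not None and c in sub:
--             section += pending * sub[c]
--             pending = None
--         elif c in digit_map:
--             section += pending if pending is not None else 0
--             pending = digit_map[c]
--         elif c in sub:
--             section += sub[c]
--             pending = None
--         else:
--             raise ValueError(f"Invalid {system_name} character: {c!r}")
--         first = False
--     return result + section + (pending if pending is not None else 0)
-- ===== Notes on version B (the rewrite author's own statement) =====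
-- stated objective: simpler
-- what changed: A splits the numeral at the myriad glyph with index/slicing and parses each piece with a two-char-lookahead while-loop helper; B is one forward pass over the whole string with a pending-digit accumulator and no split, slicing or helper. Pre_ excludes the inputs where A raises (empty multiplier_map: IndexError; …
-- outside the precondition, e.g. on multiplicative_myriad_from_numeral('ab', {'a': 1, 'b': 2}, {'ab': 1, 'X': 10}, 't'): A returns 10002, B returns 3
import Mathlib
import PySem

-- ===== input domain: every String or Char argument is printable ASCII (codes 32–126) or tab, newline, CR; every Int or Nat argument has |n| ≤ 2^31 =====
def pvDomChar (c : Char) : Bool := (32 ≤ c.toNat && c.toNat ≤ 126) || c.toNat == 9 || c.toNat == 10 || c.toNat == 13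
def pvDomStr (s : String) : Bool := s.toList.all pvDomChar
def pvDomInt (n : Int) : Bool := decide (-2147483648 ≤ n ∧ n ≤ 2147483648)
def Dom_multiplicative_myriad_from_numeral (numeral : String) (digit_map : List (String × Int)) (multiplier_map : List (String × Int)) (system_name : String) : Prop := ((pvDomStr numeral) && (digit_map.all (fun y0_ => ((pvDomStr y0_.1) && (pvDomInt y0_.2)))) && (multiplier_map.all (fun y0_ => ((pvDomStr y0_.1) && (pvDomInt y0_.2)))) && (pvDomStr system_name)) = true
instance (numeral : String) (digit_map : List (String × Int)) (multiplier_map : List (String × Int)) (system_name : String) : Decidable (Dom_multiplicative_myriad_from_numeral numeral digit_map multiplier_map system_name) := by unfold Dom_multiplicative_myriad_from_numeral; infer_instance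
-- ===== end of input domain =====

-- B replaces A's split-at-glyph + lookahead helper parser by a single forward pass with a
-- pending-digit accumulator (objective: simpler; same O(n) cost).


-- ===== PORT A =====
-- A's inner helper `parse_sub`: while-loop with a one-character lookahead after a digit.
-- The `else` arm is Python's `raise ValueError` — excluded by Pre_, the port returns the total so far.
def pvParseSubA (digits subm : PySem.Dict String Int) : List Char → Int → Int
  | [], total => total
  | c :: rest, total =>
    if digits.contains (String.ofList [c]) then
      let d := digits.getD (String.ofList [c]) 0
      match hr : rest with
      | c2 :: rest2 =>
        if subm.contains (String.ofList [c2]) then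
          pvParseSubA digits subm rest2 (total + d * subm.getD (String.ofList [c2]) 0)
        else
          pvParseSubA digits subm rest (total + d)
      | [] => total + d
    else if subm.contains (String.ofList [c]) then
      pvParseSubA digits subm rest (total + subm.getD (String.ofList [c]) 0)
    else total
  termination_by cs _ => cs.length
  decreasing_by all_goals ((try subst hr); simp; try omega)

def multiplicative_myriad_from_numeral (numeral : String) (digit_map : List (String × Int)) (multiplier_map : List (String × Int)) (system_name : String) : Int :=
  match (PySem.Dict.ofList multiplier_map).items with
  | [] => 0        -- Python: IndexError on items[0]; excluded by Pre_
  | (myriad_glyph, _) :: rest_items =>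
    let sub_mult_map := PySem.Dict.ofList rest_items     -- dict(items[1:])
    let digits := PySem.Dict.ofList digit_map
    if PySem.Str.isIn myriad_glyph numeral then
      let idx : Int := PySem.Str.find numeral myriad_glyph     -- numeral.index (guarded, so find = index)
      let coeff := if idx > 0 then pvParseSubA digits sub_mult_map (PySem.List.slice numeral.toList none (some idx)) 0 else 1
      let remainder := if idx + 1 < (numeral.toList.length : Int) then pvParseSubA digits sub_mult_map (PySem.List.slice numeral.toList (some (idx + 1)) none) 0 else 0
      coeff * 10000 + remainder
    else
      pvParseSubA digits sub_mult_map numeral.toList 0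

-- ===== PORT B =====
-- B's single for-loop; state (result, section, pending, seen_myriad, first).
-- The final `else` arm is Source B's `raise ValueError` — excluded by Pre_.
def pvScanB (myriad : String) (digits sub : PySem.Dict String Int) : List Char → Int → Int → Option Int → Bool → Bool → Int
  | [], result, sect, pending, _, _ => result + sect + pending.getD 0
  | c :: rest, result, sect, pending, seen, first =>
    if !seen && (String.ofList [c] == myriad) then
      pvScanB myriad digits sub rest ((if first then 1 else sect + pending.getD 0) * 10000) 0 none true false
    else if pending.isSome && sub.contains (String.ofList [c]) then
      pvScanB myriad digits sub rest result (sect + pending.getD 0 * sub.getD (String.ofList [c]) 0) none seen false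
    else if digits.contains (String.ofList [c]) then
      pvScanB myriad digits sub rest result (sect + pending.getD 0) (some (digits.getD (String.ofList [c]) 0)) seen false
    else if sub.contains (String.ofList [c]) then
      pvScanB myriad digits sub rest result (sect + sub.getD (String.ofList [c]) 0) none seen false
    else result + sect + pending.getD 0

def multiplicative_myriad_from_numeral_alt (numeral : String) (digit_map : List (String × Int)) (multiplier_map : List (String × Int)) (system_name : String) : Int :=
  match (PySem.Dict.ofList multiplier_map).items with
  | [] => 0        -- Python: IndexError on items[0]; excluded by Pre_
  | (myriad, _) :: rest_items =>
    pvScanB myriad (PySem.Dict.ofList digit_map) (PySem.Dict.ofList rest_items) numeral.toList 0 0 none false true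

-- ===== PRECONDITION & SPEC =====
def pvRecog (digits subm : PySem.Dict String Int) (c : Char) : Bool :=
  digits.contains (String.ofList [c]) || subm.contains (String.ofList [c])

-- Pre_ excludes the inputs where A raises (empty multiplier_map: IndexError; an unrecognised
-- character: ValueError) and the corner where the myriad glyph is not a single character yet
-- occurs as a substring of the numeral — an unspecified corner in which A's substring split and
-- B's per-character glyph matching are two defensible readings that no caller would specify.
def pvPreB (numeral : String) (digit_map : List (String × Int)) (multiplier_map : List (String × Int)) : Bool :=
  match (PySem.Dict.ofList multiplier_map).items with
  | [] => false
  | (g, _) :: rest_items =>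
    let recog := pvRecog (PySem.Dict.ofList digit_map) (PySem.Dict.ofList rest_items)
    match g.toList with
    | [c0] =>
      if c0 ∈ numeral.toList
      then (numeral.toList.erase c0).all recog
      else numeral.toList.all recog
    | _ => !(PySem.Str.isIn g numeral) && numeral.toList.all recog

def Pre_multiplicative_myriad_from_numeral (numeral : String) (digit_map : List (String × Int)) (multiplier_map : List (String × Int)) (system_name : String) : Prop :=
  pvPreB numeral digit_map multiplier_map = true

instance (numeral : String) (digit_map : List (String × Int)) (multiplier_map : List (String × Int)) (system_name : String) : Decidable (Pre_multiplicative_myriad_from_numeral numeral digit_map multiplier_map system_name) := by unfold Pre_multiplicative_myriad_from_numeral; infer_instance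

def pvWitness_multiplicative_myriad_from_numeral : String × (List (String × Int)) × (List (String × Int)) × String :=
  ("abMa", [("a", 1), ("b", 2)], [("M", 10000), ("X", 10), ("b", 100)], "test")

def Spec_multiplicative_myriad_from_numeral (numeral : String) (digit_map : List (String × Int)) (multiplier_map : List (String × Int)) (system_name : String) (out : Int) : Prop := out = multiplicative_myriad_from_numeral_alt numeral digit_map multiplier_map system_name
instance (numeral : String) (digit_map : List (String × Int)) (multiplier_map : List (String × Int)) (system_name : String) (out : Int) : Decidable (Spec_multiplicative_myriad_from_numeral numeral digit_map multiplier_map system_name out) := by unfold Spec_multiplicative_myriad_from_numeral; infer_instance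

-- ===== CLAIM (what is proved, stated in full; the proofs are below) =====
def Claim_equal_multiplicative_myriad_from_numeral : Prop := ∀ (numeral : String) (digit_map : List (String × Int)) (multiplier_map : List (String × Int)) (system_name : String), Dom_multiplicative_myriad_from_numeral numeral digit_map multiplier_map system_name → Pre_multiplicative_myriad_from_numeral numeral digit_map multiplier_map system_name → Spec_multiplicative_myriad_from_numeral numeral digit_map multiplier_map system_name (multiplicative_myriad_from_numeral numeral digit_map multiplier_map system_name)

-- ===== LEMMAS AND PROOFS =====

-- `pvResume d cs`: the value parse_sub still produces from position of `cs` when a digit `d`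
-- has just been consumed (some d) or no digit is pending (none).
def pvResume (digits subm : PySem.Dict String Int) (pend : Option Int) (cs : List Char) : Int :=
  match pend with
  | none => pvParseSubA digits subm cs 0
  | some d =>
    match cs with
    | [] => d
    | c :: r =>
      if subm.contains (String.ofList [c]) then d * subm.getD (String.ofList [c]) 0 + pvParseSubA digits subm r 0
      else d + pvParseSubA digits subm (c :: r) 0

-- parse_sub is linear in its accumulator.
theorem pA_shift (digits subm : PySem.Dict String Int) :
    ∀ (n : Nat) (cs : List Char), cs.length ≤ n → ∀ t, pvParseSubA digits subm cs t = t + pvParseSubA digits subm cs 0 := by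
  intro n
  induction n with
  | zero =>
    intro cs h t
    match cs with
    | [] => simp [pvParseSubA]
    | c :: r => simp at h
  | succ n ih =>
    intro cs h t
    match cs with
    | [] => simp [pvParseSubA]
    | c :: rest =>
      rw [pvParseSubA, pvParseSubA]
      by_cases hd : digits.contains (String.ofList [c]) = true
      · simp only [hd, if_true]
        match rest with
        | [] => simp
        | c2 :: rest2 =>
          have h2 : rest2.length ≤ n := by simp at h; omega
          have h1 : (c2 :: rest2).length ≤ n := by simp at h ⊢; omega
          by_cases hs : subm.contains (String.ofList [c2]) = true
          · simp only [hs, if_true]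
            rw [ih rest2 h2 (t + digits.getD (String.ofList [c]) 0 * subm.getD (String.ofList [c2]) 0),
                ih rest2 h2 (0 + digits.getD (String.ofList [c]) 0 * subm.getD (String.ofList [c2]) 0)]
            ring
          · simp only [hs, if_false, Bool.false_eq_true]
            rw [ih (c2 :: rest2) h1 (t + digits.getD (String.ofList [c]) 0),
                ih (c2 :: rest2) h1 (0 + digits.getD (String.ofList [c]) 0)]
            ring
      · simp only [hd, if_false, Bool.false_eq_true]
        by_cases hs : subm.contains (String.ofList [c]) = true
        · have h1 : rest.length ≤ n := by simp at h; omega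
          simp only [hs, if_true]
          rw [ih rest h1 (t + subm.getD (String.ofList [c]) 0),
              ih rest h1 (0 + subm.getD (String.ofList [c]) 0)]
          ring
        · simp only [hs, if_false, Bool.false_eq_true]
          omega

theorem pA_acc (digits subm : PySem.Dict String Int) (cs : List Char) (t : Int) :
    pvParseSubA digits subm cs t = t + pvParseSubA digits subm cs 0 :=
  pA_shift digits subm cs.length cs le_rfl t

theorem pA_cons_digit (digits subm : PySem.Dict String Int) (c : Char) (rest : List Char)
    (h : digits.contains (String.ofList [c]) = true) :
    pvParseSubA digits subm (c :: rest) 0 = pvResume digits subm (some (digits.getD (String.ofList [c]) 0)) rest := by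
  rw [pvParseSubA]
  simp only [h, if_true]
  match rest with
  | [] => simp [pvResume]
  | c2 :: rest2 =>
    by_cases hs : subm.contains (String.ofList [c2]) = true
    · simp only [hs, if_true, pvResume]
      rw [pA_acc digits subm rest2 (0 + digits.getD (String.ofList [c]) 0 * subm.getD (String.ofList [c2]) 0)]
      ring
    · simp only [hs, if_false, Bool.false_eq_true, pvResume]
      rw [pA_acc digits subm (c2 :: rest2) (0 + digits.getD (String.ofList [c]) 0)]
      ring

theorem pA_cons_sub (digits subm : PySem.Dict String Int) (c : Char) (rest : List Char)
    (hd : ¬ digits.contains (String.ofList [c]) = true) (hs : subm.contains (String.ofList [c]) = true) :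
    pvParseSubA digits subm (c :: rest) 0 = subm.getD (String.ofList [c]) 0 + pvParseSubA digits subm rest 0 := by
  rw [pvParseSubA]
  simp only [hd, hs, if_true, if_false, Bool.false_eq_true]
  rw [pA_acc digits subm rest (0 + subm.getD (String.ofList [c]) 0)]
  ring

-- The scan over a stretch that never triggers the myriad branch computes parse_sub.
theorem scan_flat (g : String) (digits subm : PySem.Dict String Int) :
    ∀ (cs : List Char) (res sec : Int) (pend : Option Int) (seen first : Bool),
      (∀ c ∈ cs, pvRecog digits subm c = true) →
      (seen = true ∨ ∀ c ∈ cs, (String.ofList [c] == g) = false) →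
      pvScanB g digits subm cs res sec pend seen first = res + sec + pvResume digits subm pend cs := by
  intro cs
  induction cs with
  | nil =>
    intro res sec pend seen first _ _
    cases pend <;> simp [pvScanB, pvResume, pvParseSubA]
  | cons c rest ih =>
    intro res sec pend seen first hrec hg
    have hrc : pvRecog digits subm c = true := hrec c (by simp)
    have hrec' : ∀ x ∈ rest, pvRecog digits subm x = true := fun x hx => hrec x (by simp [hx])
    have hg' : seen = true ∨ ∀ x ∈ rest, (String.ofList [x] == g) = false := by
      rcases hg with h | h
      · exact Or.inl h
      · exact Or.inr fun x hx => h x (by simp [hx])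
    have hgc : (!seen && (String.ofList [c] == g)) = false := by
      rcases hg with h | h
      · simp [h]
      · simp [h c (by simp)]
    rw [pvScanB, hgc]
    simp only [Bool.false_eq_true, if_false]
    by_cases hs : subm.contains (String.ofList [c]) = true
    · cases pend with
      | some d =>
        simp only [Option.isSome_some, hs, Bool.and_self, if_true, Option.getD_some]
        rw [ih _ _ none seen false hrec' hg']
        simp only [pvResume, hs, if_true]
        ring
      | none =>
        simp only [Option.isSome_none, Bool.false_and, Bool.false_eq_true, if_false]
        by_cases hd : digits.contains (String.ofList [c]) = true
        · simp only [hd, if_true, Option.getD_none]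
          rw [ih _ _ (some (digits.getD (String.ofList [c]) 0)) seen false hrec' hg']
          rw [← pA_cons_digit digits subm c rest hd]
          simp only [pvResume]
          ring
        · simp only [hd, hs, Bool.false_eq_true, if_false, if_true]
          rw [ih _ _ none seen false hrec' hg']
          simp only [pvResume]
          rw [pA_cons_sub digits subm c rest hd hs]
          ring
    · have hd : digits.contains (String.ofList [c]) = true := by
        have := hrc
        simp [pvRecog, hs] at this
        exact this
      simp only [hs, Bool.and_false, Bool.false_eq_true, if_false, hd, if_true]
      rw [ih _ _ (some (digits.getD (String.ofList [c]) 0)) seen false hrec' hg']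
      rw [← pA_cons_digit digits subm c rest hd]
      cases pend with
      | some d =>
        simp only [Option.getD_some, pvResume, hs, Bool.false_eq_true, if_false]
        ring
      | none =>
        simp only [Option.getD_none, pvResume]
        ring

-- The scan on  pre ++ g0 :: suf  (no myriad hit inside pre) equals A's split computation.
theorem scan_glyph (g : String) (digits subm : PySem.Dict String Int) (g0 : Char)
    (hg0 : (String.ofList [g0] == g) = true) :
    ∀ (pre suf : List Char) (sec : Int) (pend : Option Int) (first : Bool),
      (∀ c ∈ pre, pvRecog digits subm c = true) →
      (∀ c ∈ pre, (String.ofList [c] == g) = false) →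
      (∀ c ∈ suf, pvRecog digits subm c = true) →
      pvScanB g digits subm (pre ++ g0 :: suf) 0 sec pend false first =
        (if first && pre.isEmpty then 1 else sec + pvResume digits subm pend pre) * 10000
            + pvParseSubA digits subm suf 0 := by
  intro pre
  induction pre with
  | nil =>
    intro suf sec pend first _ _ hsuf
    rw [List.nil_append, pvScanB]
    simp only [Bool.not_false, hg0, Bool.and_self, if_true]
    rw [scan_flat g digits subm suf _ _ none true false hsuf (Or.inl rfl)]
    cases pend <;> cases first <;>
      simp only [pvResume, pvParseSubA, List.isEmpty_nil, Bool.and_true, Option.getD_none,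
        Option.getD_some, if_true] <;> ring
  | cons c pre' ih =>
    intro suf sec pend first hrec hng hsuf
    have hrc : pvRecog digits subm c = true := hrec c (by simp)
    have hrec' : ∀ x ∈ pre', pvRecog digits subm x = true := fun x hx => hrec x (by simp [hx])
    have hng' : ∀ x ∈ pre', (String.ofList [x] == g) = false := fun x hx => hng x (by simp [hx])
    rw [List.cons_append, pvScanB]
    have hgc : (!(false : Bool) && (String.ofList [c] == g)) = false := by simp [hng c (by simp)]
    rw [hgc]
    simp only [Bool.false_eq_true, if_false, List.isEmpty_cons, Bool.and_false]
    by_cases hs : subm.contains (String.ofList [c]) = true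
    · cases pend with
      | some d =>
        simp only [Option.isSome_some, hs, Bool.and_self, if_true, Option.getD_some]
        rw [ih suf _ none false hrec' hng' hsuf]
        simp only [Bool.false_and, Bool.false_eq_true, if_false, pvResume, hs, if_true]
        ring
      | none =>
        simp only [Option.isSome_none, Bool.false_and, Bool.false_eq_true, if_false]
        by_cases hd : digits.contains (String.ofList [c]) = true
        · simp only [hd, if_true, Option.getD_none]
          rw [ih suf _ (some (digits.getD (String.ofList [c]) 0)) false hrec' hng' hsuf]
          rw [← pA_cons_digit digits subm c pre' hd]
          simp only [Bool.false_and, Bool.false_eq_true, if_false, pvResume]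
          ring
        · simp only [hd, hs, Bool.false_eq_true, if_false, if_true]
          rw [ih suf _ none false hrec' hng' hsuf]
          simp only [Bool.false_and, Bool.false_eq_true, if_false, pvResume]
          rw [pA_cons_sub digits subm c pre' hd hs]
          ring
    · have hd : digits.contains (String.ofList [c]) = true := by
        have := hrc
        simp [pvRecog, hs] at this
        exact this
      simp only [hs, Bool.and_false, Bool.false_eq_true, if_false, hd, if_true]
      rw [ih suf _ (some (digits.getD (String.ofList [c]) 0)) false hrec' hng' hsuf]
      rw [← pA_cons_digit digits subm c pre' hd]
      cases pend with
      | some d =>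
        simp only [Option.getD_some, Bool.false_and, Bool.false_eq_true, if_false, pvResume, hs]
        ring
      | none =>
        simp only [Option.getD_none, Bool.false_and, Bool.false_eq_true, if_false, pvResume]
        ring

theorem pv_mg_iff (g : String) (c : Char) : (String.ofList [c] == g) = true ↔ g.toList = [c] := by
  constructor
  · intro h
    have h' : String.ofList [c] = g := by exact_mod_cast (beq_iff_eq).mp h
    rw [← h', String.toList_ofList]
  · intro h
    rw [← String.ofList_toList (s := g), h]
    simp

theorem pv_find_singleton (pre suf : List Char) (g0 : Char) (hpre : g0 ∉ pre) :
    PySem.Chars.find (pre ++ g0 :: suf) [g0] = (pre.length : Int) := by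
  have hinf : [g0] <:+: pre ++ g0 :: suf := (List.singleton_infix_iff _ _).mpr (by simp)
  have h0 : (0:Int) ≤ PySem.Chars.find (pre ++ g0 :: suf) [g0] :=
    (PySem.Chars.find_nonneg_iff _ _).mpr hinf
  obtain ⟨hpref, hmin⟩ := PySem.Chars.find_spec (s := pre ++ g0 :: suf) (sub := [g0]) h0
  set n := (PySem.Chars.find (pre ++ g0 :: suf) [g0]).toNat with hn
  have hat : [g0] <+: (pre ++ g0 :: suf).drop pre.length := by
    rw [List.drop_left]; exact ⟨suf, rfl⟩
  have hle : n ≤ pre.length := by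
    by_contra h
    exact absurd hat (hmin _ (by omega))
  have hnlt : ¬ n < pre.length := by
    intro hlt
    rcases hpref with ⟨t, ht⟩
    have hh : ((pre ++ g0 :: suf).drop n).head? = some g0 := by rw [← ht]; rfl
    rw [List.head?_drop] at hh
    rw [List.getElem?_append_left (by omega)] at hh
    exact hpre (List.mem_of_getElem? hh)
  have : n = pre.length := by omega
  omega

-- ===== VERDICT (by name: the statement is the Claim_ definition above) =====
theorem multiplicative_myriad_from_numeral_spec : Claim_equal_multiplicative_myriad_from_numeral := by
  intro numeral digit_map multiplier_map system_name _ hpre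
  unfold Spec_multiplicative_myriad_from_numeral
  unfold Pre_multiplicative_myriad_from_numeral pvPreB at hpre
  unfold multiplicative_myriad_from_numeral multiplicative_myriad_from_numeral_alt
  rcases hitems : (PySem.Dict.ofList multiplier_map).items with _ | ⟨⟨g, v⟩, rest_items⟩
  · rw [hitems] at hpre
  · rw [hitems] at hpre
    dsimp only at hpre
    dsimp only
    set cs := numeral.toList with hcsdef
    set digits := PySem.Dict.ofList digit_map with hdigdef
    set subm := PySem.Dict.ofList rest_items with hsubdef
    rcases hg : g.toList with _ | ⟨c0, _ | ⟨c1, r1⟩⟩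
    -- empty glyph: Pre_ gives isIn = false and everything recognised
    · rw [hg] at hpre
      dsimp only at hpre
      simp only [Bool.and_eq_true, Bool.not_eq_eq_eq_not, Bool.not_true] at hpre
      obtain ⟨hnin, hall⟩ := hpre
      rw [hnin]
      simp only [Bool.false_eq_true, if_false]
      rw [scan_flat g digits subm cs 0 0 none false true
            (fun c hc => by exact (List.all_eq_true.mp hall) c hc)
            (Or.inr (fun c hc => by
              cases hb : (String.ofList [c] == g) with
              | false => rfl
              | true =>
                have h2 := (pv_mg_iff g c).mp hb
                rw [hg] at h2
                exact absurd h2 (by simp)))]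
      simp [pvResume]
    -- single-character glyph
    · rw [hg] at hpre
      dsimp only at hpre
      by_cases hmem : c0 ∈ cs
      · rw [if_pos hmem] at hpre
        -- decompose at the first occurrence
        obtain ⟨k, hk⟩ : ∃ k, PySem.List.index? cs c0 = some k :=
          Option.isSome_iff_exists.mp ((PySem.List.index?_isSome_iff cs c0).mpr hmem)
        obtain ⟨pre, suf, hcs, hklen, hnot⟩ := (PySem.List.index?_eq_some_iff cs c0 k).mp hk
        have herase : cs.erase c0 = pre ++ suf := by
          rw [hcs, List.erase_append_right _ hnot, List.erase_cons_head]
        rw [herase] at hpre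
        have hallpre : ∀ c ∈ pre, pvRecog digits subm c = true := by
          intro c hc
          exact (List.all_eq_true.mp hpre) c (by simp [hc])
        have hallsuf : ∀ c ∈ suf, pvRecog digits subm c = true := by
          intro c hc
          exact (List.all_eq_true.mp hpre) c (by simp [hc])
        have hg0 : (String.ofList [c0] == g) = true := (pv_mg_iff g c0).mpr hg
        have hng : ∀ c ∈ pre, (String.ofList [c] == g) = false := by
          intro c hc
          cases hb : (String.ofList [c] == g) with
          | false => rfl
          | true =>
            have h2 := (pv_mg_iff g c).mp hb
            rw [hg] at h2
            have hcc : c = c0 := by injection h2 with h3; exact h3.symm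
            exact absurd (hcc ▸ hc) hnot
        have hIn : PySem.Str.isIn g numeral = true := by
          rw [PySem.Str.isIn_iff_infix, hg]
          exact (List.singleton_infix_iff _ _).mpr hmem
        have hfind : PySem.Str.find numeral g = (pre.length : Int) := by
          rw [PySem.Str.find_eq, hg, ← hcsdef, hcs]
          exact pv_find_singleton pre suf c0 hnot
        rw [hIn]
        simp only [if_true, hfind]
        rw [hcs]
        rw [scan_glyph g digits subm c0 hg0 pre suf 0 none true hallpre hng hallsuf]
        have htake : PySem.List.slice (pre ++ c0 :: suf) none (some (pre.length : Int)) = pre := by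
          rw [PySem.List.slice_to_natCast, List.take_left]
        have hcast : (pre.length : Int) + 1 = ((pre.length + 1 : Nat) : Int) := by push_cast; ring
        have hdrop : PySem.List.slice (pre ++ c0 :: suf) (some ((pre.length : Int) + 1)) none = suf := by
          rw [hcast, PySem.List.slice_from_natCast]
          have h2 : pre ++ c0 :: suf = (pre ++ [c0]) ++ suf := by simp
          rw [h2, List.drop_left' (by simp)]
        rw [htake, hdrop]
        have hlen : (pre ++ c0 :: suf).length = pre.length + suf.length + 1 := by simp; omega
        by_cases hpe : pre = []
        · subst hpe
          simp only [List.isEmpty_nil, Bool.and_true, List.length_nil, Nat.cast_zero, if_true]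
          have : ¬ ((0 : Int) > 0) := by omega
          rw [if_neg this]
          by_cases hse : suf = []
          · subst hse
            simp [pvParseSubA]
          · have hsl : 0 < suf.length := List.length_pos_iff.mpr hse
            have : ((0:Nat) : Int) + 1 < (([] : List Char) ++ c0 :: suf).length := by
              simp
              omega
            rw [if_pos (by simpa using this)]
        · have hpl : 0 < pre.length := List.length_pos_iff.mpr hpe
          have h1 : ((pre.length : Int) > 0) := by exact_mod_cast hpl
          rw [if_pos h1]
          have hpe' : pre.isEmpty = false := by simp [hpe]
          simp only [hpe', Bool.and_false, Bool.false_eq_true, if_false]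
          simp only [pvResume]
          by_cases hse : suf = []
          · subst hse
            have : ¬ ((pre.length : Int) + 1 < ((pre ++ [c0]).length : Int)) := by
              simp
            rw [if_neg (by simpa using this)]
            simp [pvParseSubA]
          · have hsl : 0 < suf.length := List.length_pos_iff.mpr hse
            have : ((pre.length : Int) + 1 < ((pre ++ c0 :: suf).length : Int)) := by
              rw [hlen]; push_cast; omega
            rw [if_pos this]
            ring
      · rw [if_neg hmem] at hpre
        have hnin : PySem.Str.isIn g numeral = false := by
          cases hb : PySem.Str.isIn g numeral with
          | false => rfl
          | true =>
            rw [PySem.Str.isIn_iff_infix, hg] at hb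
            exact absurd ((List.singleton_infix_iff _ _).mp hb) hmem
        rw [hnin]
        simp only [Bool.false_eq_true, if_false]
        rw [scan_flat g digits subm cs 0 0 none false true
              (fun c hc => (List.all_eq_true.mp hpre) c hc)
              (Or.inr (fun c hc => by
                cases hb : (String.ofList [c] == g) with
                | false => rfl
                | true =>
                  have h2 := (pv_mg_iff g c).mp hb
                  rw [hg] at h2
                  have hcc : c = c0 := by injection h2 with h3; exact h3.symm
                  exact absurd (hcc ▸ hc) hmem))]
        simp [pvResume]
    -- glyph of length ≥ 2
    · rw [hg] at hpre
      dsimp only at hpre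
      simp only [Bool.and_eq_true, Bool.not_eq_eq_eq_not, Bool.not_true] at hpre
      obtain ⟨hnin, hall⟩ := hpre
      rw [hnin]
      simp only [Bool.false_eq_true, if_false]
      rw [scan_flat g digits subm cs 0 0 none false true
            (fun c hc => (List.all_eq_true.mp hall) c hc)
            (Or.inr (fun c hc => by
              cases hb : (String.ofList [c] == g) with
              | false => rfl
              | true =>
                have := (pv_mg_iff g c).mp hb
                rw [hg] at this
                exact absurd this (by simp)))]
      simp [pvResume]
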